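-- pv_equiv track=rewrite | github.com/Filkoss/algoritmizace | 18.2/lodicky.py | boat_brute_force
-- ===== SOURCE A (Python) =====
-- import itertools
--
-- def boat_brute_force(a, b, c):
--     """
--     Brute-force algoritmus:
--     1) Vygenerujeme všech 6 možných permutací (tj. uspořádání) tří pasažérů.
--     2) U každé permutace spočítáme 'rating' = (váha na pravoboku) - (váha na levoboku).
--     3) Sledujeme, které permutace mají nejmenší absolutní hodnotu ratingu.
--     4) Vrátíme všechny takto nejlepší permutace + příslušnou minimální hodnotu |rating|.
--
--     Tato funkce je deterministická: vždy vrací stejné výsledky pro stejné vstupy.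
--     """
--     passengers = [a, b, c]
--     best_solutions = []
--     best_abs_diff = None
--
--     for perm in itertools.permutations(passengers):
--         left, center, right = perm
--         rating = right - left  # kladné => těžší vpravo, záporné => těžší vlevo
--
--         # Minimalizujeme absolutní hodnotu rozdílu
--         if best_abs_diff is None or abs(rating) < best_abs_diff:
--             best_abs_diff = abs(rating)
--             best_solutions = [perm]
--         elif abs(rating) == best_abs_diff:
--             best_solutions.append(perm)
--
--     return best_solutions, best_abs_diff
-- ===== SOURCE B (Python) =====
-- import itertools
--
-- def boat_brute_force(a, b, c):
--     perms = list(itertools.permutations([a, b, c]))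
--     best_abs_diff = min(abs(right - left) for (left, center, right) in perms)
--     best_solutions = [p for p in perms if abs(p[2] - p[0]) == best_abs_diff]
--     return best_solutions, best_abs_diff
-- ===== Notes on version B (the rewrite author's own statement) =====
-- stated objective: simpler
-- what changed: Replaces the one-pass accumulator (reset-or-append with an Optional running best) by a min-then-filter decomposition: compute the minimal |right-left| over all six permutations first, then keep the permutations attaining it.
import Mathlib
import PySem

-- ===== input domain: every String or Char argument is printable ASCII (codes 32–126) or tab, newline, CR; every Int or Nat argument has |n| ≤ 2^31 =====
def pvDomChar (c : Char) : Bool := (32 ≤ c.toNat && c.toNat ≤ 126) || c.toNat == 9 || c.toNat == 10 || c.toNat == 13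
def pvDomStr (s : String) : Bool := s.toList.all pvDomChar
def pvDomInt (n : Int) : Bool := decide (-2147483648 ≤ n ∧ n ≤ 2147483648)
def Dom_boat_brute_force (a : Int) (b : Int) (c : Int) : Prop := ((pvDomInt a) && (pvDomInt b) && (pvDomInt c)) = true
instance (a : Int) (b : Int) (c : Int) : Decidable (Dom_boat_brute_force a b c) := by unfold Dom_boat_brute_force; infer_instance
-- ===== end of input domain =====

-- B replaces A's one-pass accumulator (reset-or-append with an Optional running best)
-- by a min-then-filter decomposition; objective: simpler, same cost.

-- ===== PORT A =====
-- A's loop body: perm -> rating = right - left; reset / append / keep on |rating| vs best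
def pvStepA (st : List (Int × Int × Int) × Option Int) (perm : Int × Int × Int) :
    List (Int × Int × Int) × Option Int :=
  let rating := perm.2.2 - perm.1
  match st.2 with
  | none => ([perm], some |rating|)
  | some b0 =>
      if |rating| < b0 then ([perm], some |rating|)
      else if |rating| = b0 then (st.1 ++ [perm], some b0)
      else st

def boat_brute_force (a : Int) (b : Int) (c : Int) : (List (Int × Int × Int)) × Int :=
  -- itertools.permutations([a,b,c]) in Python's order
  let perms : List (Int × Int × Int) := [(a,b,c),(a,c,b),(b,a,c),(b,c,a),(c,a,b),(c,b,a)]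
  let res := perms.foldl pvStepA ([], none)
  -- best_abs_diff is never None here (the loop runs 6 times); .getD 0 only discharges the Option
  (res.1, res.2.getD 0)

-- ===== PORT B =====
def boat_brute_force_alt (a : Int) (b : Int) (c : Int) : (List (Int × Int × Int)) × Int :=
  let perms : List (Int × Int × Int) := [(a,b,c),(a,c,b),(b,a,c),(b,c,a),(c,a,b),(c,b,a)]
  -- min(...) over a nonempty list; .getD 0 only discharges the Option
  let best := (PySem.List.min? (perms.map (fun p => |p.2.2 - p.1|)) (fun x => x)).getD 0
  (perms.filter (fun p => |p.2.2 - p.1| == best), best)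

-- ===== PRECONDITION & SPEC =====
def Spec_boat_brute_force (a : Int) (b : Int) (c : Int) (out : (List (Int × Int × Int)) × Int) : Prop := out = boat_brute_force_alt a b c
instance (a : Int) (b : Int) (c : Int) (out : (List (Int × Int × Int)) × Int) : Decidable (Spec_boat_brute_force a b c out) := by unfold Spec_boat_brute_force; infer_instance

-- ===== CLAIM (what is proved, stated in full; the proofs are below) =====
def Claim_equal_boat_brute_force : Prop := ∀ (a : Int) (b : Int) (c : Int), Dom_boat_brute_force a b c → Spec_boat_brute_force a b c (boat_brute_force a b c)

-- ===== LEMMAS AND PROOFS =====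

def pvD (p : Int × Int × Int) : Int := |p.2.2 - p.1|

theorem pvFoldlMin_le (l : List Int) (x : Int) : l.foldl min x ≤ x := by
  induction l generalizing x with
  | nil => simp
  | cons y t ih => simpa using le_trans (ih (min x y)) (min_le_left x y)

-- invariant of A's loop, started at (sols, some m): it ends with the running minimum
-- M of m and all remaining keys, and the filter of the remaining perms at M
-- (prefixed by sols exactly when M did not improve on m)
theorem pvFoldInv (ps : List (Int × Int × Int)) (sols : List (Int × Int × Int)) (m : Int) :
    ps.foldl pvStepA (sols, some m) =
      ((if (ps.map pvD).foldl min m = m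
          then sols ++ ps.filter (fun p => pvD p == (ps.map pvD).foldl min m)
          else ps.filter (fun p => pvD p == (ps.map pvD).foldl min m)),
       some ((ps.map pvD).foldl min m)) := by
  induction ps generalizing sols m with
  | nil => simp
  | cons p t ih =>
    have hM : ∀ x : Int, (t.map pvD).foldl min x ≤ x := fun x => pvFoldlMin_le _ x
    rcases lt_trichotomy (pvD p) m with h | h | h
    · -- reset
      have hr : |p.2.2 - p.1| < m := h
      have hstep : pvStepA (sols, some m) p = ([p], some (pvD p)) := by
        simp [pvStepA, pvD, hr]
      have hmin : min m (pvD p) = pvD p := min_eq_right h.le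
      simp only [List.foldl_cons, hstep, ih, List.map_cons, hmin, List.filter_cons]
      have hMm : (t.map pvD).foldl min (pvD p) ≠ m :=
        ne_of_lt (lt_of_le_of_lt (hM _) h)
      by_cases he : (t.map pvD).foldl min (pvD p) = pvD p
      · simp [he]
        exact fun hc => absurd hc (ne_of_lt h)
      · have hpe : pvD p ≠ (t.map pvD).foldl min (pvD p) := fun hc => he hc.symm
        simp [beq_iff_eq, hMm, hpe]
        exact he
    · -- tie: append
      have hr : |p.2.2 - p.1| = m := h
      have hr' : ¬ |p.2.2 - p.1| < m := by omega
      have hstep : pvStepA (sols, some m) p = (sols ++ [p], some m) := by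
        simp [pvStepA, hr]
      have hmin : min m (pvD p) = m := min_eq_left h.ge
      simp only [List.foldl_cons, hstep, ih, List.map_cons, hmin, List.filter_cons]
      by_cases he : (t.map pvD).foldl min m = m
      · simp [he, h, List.append_assoc]
      · have hpe : pvD p ≠ (t.map pvD).foldl min m := by
          rw [h]; exact fun hc => he hc.symm
        simp [he, beq_iff_eq, hpe]
    · -- worse: keep
      have hr : ¬ |p.2.2 - p.1| < m := by have := h; unfold pvD at this; omega
      have hr' : |p.2.2 - p.1| ≠ m := by have := h; unfold pvD at this; omega
      have hstep : pvStepA (sols, some m) p = (sols, some m) := by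
        simp [pvStepA, hr, hr']
      have hmin : min m (pvD p) = m := min_eq_left h.le
      have hne : pvD p ≠ (t.map pvD).foldl min m :=
        fun hc => absurd (hc ▸ hM m) (not_le.mpr h)
      simp only [List.foldl_cons, hstep, ih, List.map_cons, hmin, List.filter_cons]
      simp [beq_iff_eq, hne]

-- ===== VERDICT (by name: the statement is the Claim_ definition above) =====
theorem boat_brute_force_spec : Claim_equal_boat_brute_force := by
  intro a b c _
  show boat_brute_force a b c = boat_brute_force_alt a b c
  have h1 : boat_brute_force a b c =
      (let res := [(a,c,b),(b,a,c),(b,c,a),(c,a,b),(c,b,a)].foldl pvStepA ([(a,b,c)], some (pvD (a,b,c)))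
       (res.1, res.2.getD 0)) := by
    simp [boat_brute_force, pvStepA, pvD]
  rw [h1, pvFoldInv]
  simp only [boat_brute_force_alt, PySem.List.min?_id_cons, List.map_cons, List.map_nil,
    Option.getD_some, List.filter_cons]
  by_cases he : ([((a:Int),(c:Int),(b:Int)),(b,a,c),(b,c,a),(c,a,b),(c,b,a)].map pvD).foldl min (pvD (a,b,c)) = pvD (a,b,c)
  · simp [pvD, beq_iff_eq] at he ⊢
  · have hne : pvD (a,b,c) ≠ ([((a:Int),(c:Int),(b:Int)),(b,a,c),(b,c,a),(c,a,b),(c,b,a)].map pvD).foldl min (pvD (a,b,c)) :=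
      fun hc => he hc.symm
    simp [pvD, beq_iff_eq] at he hne ⊢
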